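-- pv_equiv track=rewrite | github.com/thor-mang/thor_mang_ui | thor_mang_calibration/src/LimbSelectionUi.py | option_name_from_list_entry
-- ===== SOURCE A (Python) =====
-- def option_name_from_list_entry(entry):
--     split = entry.split(' ')
--
--     option_name = ''
--     for i in range(0, len(split)):
--         part = split[i]
--         if part != '':
--             option_name += part
--             if i != len(split) - 1:
--                 option_name += ' '
--
--     return option_name
-- ===== SOURCE B (Python) =====
-- import re
--
-- def option_name_from_list_entry(entry):
--     # strip leading spaces only, then collapse every run of spaces to one
--     return re.sub(' +', ' ', entry.lstrip(' '))
-- ===== Notes on version B (the rewrite author's own statement) =====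
-- stated objective: idiomatic
-- what changed: Replaces the split-on-space / index-loop / conditional-reassembly with lstrip(' ') plus a single regex substitution collapsing each run of spaces to one space.
import Mathlib
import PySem

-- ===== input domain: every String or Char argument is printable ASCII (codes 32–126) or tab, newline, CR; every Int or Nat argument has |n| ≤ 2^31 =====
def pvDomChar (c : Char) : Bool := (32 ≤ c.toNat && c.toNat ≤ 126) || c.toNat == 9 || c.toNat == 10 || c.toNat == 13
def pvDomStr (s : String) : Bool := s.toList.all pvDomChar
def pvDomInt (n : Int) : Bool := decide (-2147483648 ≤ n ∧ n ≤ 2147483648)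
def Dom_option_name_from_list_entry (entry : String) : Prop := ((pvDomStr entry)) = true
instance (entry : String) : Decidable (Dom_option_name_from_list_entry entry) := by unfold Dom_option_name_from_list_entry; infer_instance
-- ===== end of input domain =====

-- B rewrites A's split/loop/reassembly as lstrip(' ') + one regex collapsing space runs (idiomatic).

-- ===== PORT A =====
-- entry.split(' '); then for i in range(len(split)): append split[i] and, if i is not
-- the last index, a space, skipping empty parts.
def option_name_from_list_entry (entry : String) : String :=
  let split := PySem.Chars.splitOn entry.toList [' ']
  let option_name : List Char :=
    (PySem.List.enumerate split 0).foldl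
      (fun option_name ip =>
        let part := ip.2
        if part ≠ [] then
          let option_name := option_name ++ part
          if ip.1 ≠ (split.length : Int) - 1 then option_name ++ [' '] else option_name
        else option_name) []
  String.ofList option_name

-- ===== PORT B =====
-- exact hand port of re.sub(' +', ' ', ·): each maximal run of ' ' becomes a single ' '
def pvCollapse : List Char → List Char
  | [] => []
  | c :: r =>
    if c = ' ' then ' ' :: pvCollapse (r.dropWhile (· == ' ')) else c :: pvCollapse r
termination_by l => l.length
decreasing_by
  · have := List.length_dropWhile_le (· == ' ') r; simp; omega
  · simp

-- entry.lstrip(' ') (spaces only, exact) then the regex substitution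
def option_name_from_list_entry_alt (entry : String) : String :=
  String.ofList (pvCollapse (entry.toList.dropWhile (· == ' ')))

-- ===== PRECONDITION & SPEC =====
def Spec_option_name_from_list_entry (entry : String) (out : String) : Prop := out = option_name_from_list_entry_alt entry
instance (entry : String) (out : String) : Decidable (Spec_option_name_from_list_entry entry out) := by unfold Spec_option_name_from_list_entry; infer_instance

-- ===== CLAIM (what is proved, stated in full; the proofs are below) =====
def Claim_equal_option_name_from_list_entry : Prop := ∀ (entry : String), Dom_option_name_from_list_entry entry → Spec_option_name_from_list_entry entry (option_name_from_list_entry entry)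

-- ===== LEMMAS AND PROOFS =====

-- canonical recursive form of s.split(' ')
def pvConsHead (p : List Char) (ps : List (List Char)) : List (List Char) :=
  (p ++ ps.headI) :: ps.tail

def pvSplitSp : List Char → List (List Char)
  | [] => [[]]
  | c :: r => if c = ' ' then [] :: pvSplitSp r else pvConsHead [c] (pvSplitSp r)

lemma pvSplitSp_ne_nil (l : List Char) : pvSplitSp l ≠ [] := by
  cases l with
  | nil => simp [pvSplitSp]
  | cons c r => simp [pvSplitSp, pvConsHead]; split <;> simp

lemma pvConsHead_nil (ps : List (List Char)) (h : ps ≠ []) : pvConsHead [] ps = ps := by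
  cases ps with
  | nil => exact absurd rfl h
  | cons p t => simp [pvConsHead]

lemma pvConsHead_consHead (p q : List Char) (ps : List (List Char)) :
    pvConsHead p (pvConsHead q ps) = pvConsHead (p ++ q) ps := by
  simp [pvConsHead, List.append_assoc]

lemma pv_go_spec : ∀ (fuel : Nat) (l cur : List Char) (acc : List (List Char)),
    l.length ≤ fuel →
    PySem.Chars.splitOn.go [' '] fuel l cur acc
      = acc.reverse ++ pvConsHead cur.reverse (pvSplitSp l) := by
  intro fuel
  induction fuel with
  | zero =>
    intro l cur acc h
    have hl : l = [] := by cases l <;> simp_all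
    subst hl
    simp [PySem.Chars.splitOn.go, pvSplitSp, pvConsHead]
  | succ fuel ih =>
    intro l cur acc h
    cases l with
    | nil => simp [PySem.Chars.splitOn.go, pvSplitSp, pvConsHead]
    | cons c r =>
      by_cases hc : c = ' '
      · subst hc
        rw [PySem.Chars.splitOn.go]
        simp only [List.isPrefixOf, beq_self_eq_true, Bool.true_and]
        simp only [if_pos]
        have hdrop : List.drop [' '].length (' ' :: r) = r := rfl
        rw [hdrop]
        rw [ih r [] ((cur.reverse) :: acc) (by simpa using Nat.lt_succ_iff.mp (by simpa using h))]
        simp [pvSplitSp, pvConsHead]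
        cases hps : pvSplitSp r with
        | nil => exact absurd hps (pvSplitSp_ne_nil r)
        | cons q t => simp
      · rw [PySem.Chars.splitOn.go]
        have hpre : List.isPrefixOf [' '] (c :: r) = false := by
          simp [List.isPrefixOf]; exact fun hh => absurd hh.symm hc
        simp only [hpre, Bool.false_eq_true, if_false]
        rw [ih r (c :: cur) acc (by simpa using Nat.lt_succ_iff.mp (by simpa using h))]
        have : pvSplitSp (c :: r) = pvConsHead [c] (pvSplitSp r) := by
          simp [pvSplitSp, hc]
        rw [this, pvConsHead_consHead]
        simp

lemma pv_splitOn_single (s : List Char) :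
    PySem.Chars.splitOn s [' '] = pvSplitSp s := by
  rw [PySem.Chars.splitOn]
  rw [pv_go_spec (s.length + 1) s [] [] (by omega)]
  simp [pvConsHead_nil _ (pvSplitSp_ne_nil s)]

-- canonical form of A's loop over the parts
def pvJ : List (List Char) → List Char
  | [] => []
  | [p] => p
  | p :: ps => (if p = [] then [] else p ++ [' ']) ++ pvJ ps

lemma pvJ_cons_cons (p : List Char) (q : List Char) (ps : List (List Char)) :
    pvJ (p :: q :: ps) = (if p = [] then [] else p ++ [' ']) ++ pvJ (q :: ps) := rfl

lemma pv_foldA_spec : ∀ (parts : List (List Char)) (s : Int) (acc : List Char) (L : Int),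
    s + parts.length = L →
    (PySem.List.enumerate parts s).foldl
      (fun option_name ip =>
        let part := ip.2
        if part ≠ [] then
          let option_name := option_name ++ part
          if ip.1 ≠ L - 1 then option_name ++ [' '] else option_name
        else option_name) acc = acc ++ pvJ parts := by
  intro parts
  induction parts with
  | nil => intro s acc L _; simp [PySem.List.enumerate_nil, pvJ]
  | cons p ps ih =>
    intro s acc L hL
    rw [PySem.List.enumerate_cons]
    cases ps with
    | nil =>
      have hs : s = L - 1 := by simp at hL; omega
      simp [PySem.List.enumerate_nil, pvJ, hs]
    | cons q t =>
      have hs : ¬ (s = L - 1) := by simp at hL; omega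
      rw [List.foldl_cons]
      rw [ih (s + 1) _ L (by simp at hL ⊢; omega)]
      rw [pvJ_cons_cons]
      by_cases hp : p = []
      · simp [hp]
      · simp [hp, hs, List.append_assoc]


lemma pvJ_head_cons (x : Char) (p : List Char) (t : List (List Char)) (hp : p ≠ []) :
    pvJ ((x :: p) :: t) = x :: pvJ (p :: t) := by
  cases t with
  | nil => rfl
  | cons q r => simp [pvJ_cons_cons, hp]

lemma pv_main : ∀ (l : List Char),
    (pvJ (pvSplitSp l) = pvCollapse (l.dropWhile (· == ' '))) ∧
    (∀ c : Char, c ≠ ' ' → pvJ (pvConsHead [c] (pvSplitSp l)) = c :: pvCollapse l) := by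
  intro l
  induction l with
  | nil =>
    constructor
    · simp [pvSplitSp, pvJ, pvCollapse]
    · intro c _; simp [pvSplitSp, pvConsHead, pvJ, pvCollapse]
  | cons d r ih =>
    obtain ⟨ihP, ihQ⟩ := ih
    by_cases hd : d = ' '
    · subst hd
      constructor
      · -- leading space: first part is empty and contributes nothing
        have h1 : pvSplitSp (' ' :: r) = [] :: pvSplitSp r := by simp [pvSplitSp]
        rw [h1]
        have h2 : pvJ ([] :: pvSplitSp r) = pvJ (pvSplitSp r) := by
          cases hps : pvSplitSp r with
          | nil => exact absurd hps (pvSplitSp_ne_nil r)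
          | cons q t => simp [pvJ_cons_cons]
        rw [h2, ihP]
        simp
      · intro c hc
        have h1 : pvSplitSp (' ' :: r) = [] :: pvSplitSp r := by simp [pvSplitSp]
        rw [h1]
        have h2 : pvConsHead [c] ([] :: pvSplitSp r) = [c] :: pvSplitSp r := by
          simp [pvConsHead]
        rw [h2]
        have h3 : pvJ ([c] :: pvSplitSp r) = c :: ' ' :: pvJ (pvSplitSp r) := by
          cases hps : pvSplitSp r with
          | nil => exact absurd hps (pvSplitSp_ne_nil r)
          | cons q t => simp [pvJ_cons_cons]
        rw [h3, ihP]
        rw [pvCollapse]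
        simp
    · have h1 : pvSplitSp (d :: r) = pvConsHead [d] (pvSplitSp r) := by
        simp [pvSplitSp, hd]
      constructor
      · rw [h1, ihQ d hd]
        have : (d :: r).dropWhile (· == ' ') = d :: r := by
          simp [hd]
        rw [this, pvCollapse]
        simp [hd]
      · intro c hc
        rw [h1]
        cases hps : pvSplitSp r with
        | nil => exact absurd hps (pvSplitSp_ne_nil r)
        | cons q t =>
          have hch : pvConsHead [c] (pvConsHead [d] (q :: t)) = (c :: d :: q) :: t := by
            simp [pvConsHead]
          rw [hch, pvJ_head_cons c (d :: q) t (by simp)]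
          have hdh : pvConsHead [d] (q :: t) = (d :: q) :: t := by simp [pvConsHead]
          rw [← hdh, ← hps, ihQ d hd]
          rw [pvCollapse]
          simp [hd]

-- ===== VERDICT (by name: the statement is the Claim_ definition above) =====
theorem option_name_from_list_entry_spec : Claim_equal_option_name_from_list_entry := by
  intro entry _
  show String.ofList
      ((PySem.List.enumerate (PySem.Chars.splitOn entry.toList [' ']) 0).foldl
        (fun option_name ip =>
          let part := ip.2
          if part ≠ [] then
            let option_name := option_name ++ part
            if ip.1 ≠ ((PySem.Chars.splitOn entry.toList [' ']).length : Int) - 1 then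
              option_name ++ [' ']
            else option_name
          else option_name) [])
    = option_name_from_list_entry_alt entry
  rw [pv_splitOn_single]
  rw [pv_foldA_spec (pvSplitSp entry.toList) 0 [] ((pvSplitSp entry.toList).length : Int)
      (by simp)]
  rw [List.nil_append, (pv_main entry.toList).1]
  rfl
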